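-- pv_equiv track=rewrite | github.com/carnaticlabs/Sangeetha-Grantha | tools/krithi-extract-enrich-worker/src/import_dikshitar_krithis.py | ordered_sections
-- ===== SOURCE A (Python) =====
-- CANONICAL_ORDER: list[str] = [
--     "pallavi",
--     "anupallavi",
--     "charanam",
--     "samashti_charanam",
--     "madhyamakala",
--     "chittaswaram",
--     "swara_sahitya",
-- ]
--
-- def _normalise_section_key(key: str) -> str:
--     """Normalise a raw JSON section key to a canonical string."""
--     return key.lower().strip().replace(" ", "_").replace("-", "_")
--
-- def ordered_sections(sections: dict) -> list[tuple[str, str]]: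
--     """Return (raw_key, text) pairs in canonical musical order.
--
--     Unknown keys are appended after the canonical set.
--     """
--     normalised = {_normalise_section_key(k): (k, v) for k, v in sections.items()}
--     result: list[tuple[str, str]] = []
--     seen: set[str] = set()
--     for canonical_key in CANONICAL_ORDER:
--         if canonical_key in normalised:
--             raw_key, text = normalised[canonical_key]
--             result.append((raw_key, text))
--             seen.add(canonical_key)
--     # Append anything not in the canonical list
--     for norm_key, (raw_key, text) in normalised.items():
--         if norm_key not in seen:
--             result.append((raw_key, text))
--     return result
-- ===== SOURCE B (Python) =====
-- CANONICAL_ORDER: list[str] = [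
--     "pallavi",
--     "anupallavi",
--     "charanam",
--     "samashti_charanam",
--     "madhyamakala",
--     "chittaswaram",
--     "swara_sahitya",
-- ]
--
-- def _normalise_section_key(key: str) -> str:
--     return key.lower().strip().replace(" ", "_").replace("-", "_")
--
-- def ordered_sections(sections: dict) -> list[tuple[str, str]]:
--     """Return (raw_key, text) pairs in canonical musical order via one rank-keyed stable sort."""
--     normalised = {_normalise_section_key(k): (k, v) for k, v in sections.items()}
--     rank = {key: i for i, key in enumerate(CANONICAL_ORDER)}
--     return [pair for _, pair in sorted(normalised.items(),
--                                        key=lambda kv: rank.get(kv[0], len(CANONICAL_ORDER)))]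
-- ===== Notes on version B (the rewrite author's own statement) =====
-- stated objective: alternative
-- what changed: Replaces A's two output passes (a canonical-order pickup loop plus a leftover-append loop guarded by a seen set) with a single stable sort of the deduplicated items keyed by a precomputed rank table, unknown keys all tied at rank len(CANONICAL_ORDER).
import Mathlib
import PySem

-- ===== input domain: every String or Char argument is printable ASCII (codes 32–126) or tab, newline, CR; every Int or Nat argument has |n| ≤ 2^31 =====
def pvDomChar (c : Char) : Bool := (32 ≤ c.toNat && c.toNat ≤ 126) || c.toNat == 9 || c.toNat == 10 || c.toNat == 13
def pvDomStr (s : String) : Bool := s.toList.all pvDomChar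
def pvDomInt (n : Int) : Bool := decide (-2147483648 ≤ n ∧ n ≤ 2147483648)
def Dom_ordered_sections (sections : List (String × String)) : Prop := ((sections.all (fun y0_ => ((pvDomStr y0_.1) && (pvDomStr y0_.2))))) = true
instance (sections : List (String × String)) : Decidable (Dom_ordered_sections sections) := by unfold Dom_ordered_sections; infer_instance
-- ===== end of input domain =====

-- B replaces A's two output passes (canonical pickup + leftover append with a seen set) by one
-- stable sort of the deduplicated items keyed by a precomputed rank table: alternative, not faster.

-- ===== PORT A =====
def pvCanonicalOrder : List String :=
  ["pallavi", "anupallavi", "charanam", "samashti_charanam",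
   "madhyamakala", "chittaswaram", "swara_sahitya"]

-- _normalise_section_key: key.lower().strip().replace(" ", "_").replace("-", "_")
def pvNormKey (key : String) : String :=
  PySem.Str.replace (PySem.Str.replace (PySem.Str.strip (PySem.Str.lower key)) " " "_") "-" "_"

-- normalised = {_normalise_section_key(k): (k, v) for k, v in sections.items()}
-- (identical first line of both Pythons, so a shared helper)
def pvNormalised (sections : List (String × String)) : PySem.Dict String (String × String) :=
  sections.foldl (fun d kv => d.insert (pvNormKey kv.1) (kv.1, kv.2)) PySem.Dict.empty

def ordered_sections (sections : List (String × String)) : List (String × String) :=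
  let normalised := pvNormalised sections
  -- first loop: pick canonical keys in order, recording them in `seen`
  let st := pvCanonicalOrder.foldl
    (fun (acc : List (String × String) × PySem.Set String) ck =>
      match normalised.get? ck with
      | some p => (acc.1 ++ [p], PySem.Set.add acc.2 ck)
      | none => acc)
    (([] : List (String × String)), (PySem.Set.empty : PySem.Set String))
  -- second loop: append anything not in the canonical list
  normalised.items.foldl
    (fun r kv => if PySem.Set.contains st.2 kv.1 then r else r ++ [kv.2]) st.1

-- ===== PORT B =====
-- rank = {key: i for i, key in enumerate(CANONICAL_ORDER)}
def pvRank : PySem.Dict String Int :=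
  (PySem.List.enumerate pvCanonicalOrder 0).foldl
    (fun d p => d.insert p.2 p.1) PySem.Dict.empty

def ordered_sections_alt (sections : List (String × String)) : List (String × String) :=
  (PySem.List.sorted (pvNormalised sections).items
      (fun kv => PySem.Dict.getD pvRank kv.1 (pvCanonicalOrder.length : Int)) false).map
    (fun kv => kv.2)

-- ===== PRECONDITION & SPEC =====
def Spec_ordered_sections (sections : List (String × String)) (out : List (String × String)) : Prop := out = ordered_sections_alt sections
instance (sections : List (String × String)) (out : List (String × String)) : Decidable (Spec_ordered_sections sections out) := by unfold Spec_ordered_sections; infer_instance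

-- ===== CLAIM (what is proved, stated in full; the proofs are below) =====
def Claim_equal_ordered_sections : Prop := ∀ (sections : List (String × String)), Dom_ordered_sections sections → Spec_ordered_sections sections (ordered_sections sections)

-- ===== LEMMAS AND PROOFS =====

theorem pv_insertBy_cons {α : Type} (before : α → α → Bool) (x y : α) (ys : List α) :
    PySem.List.insertBy before x (y :: ys) =
      if before x y then x :: y :: ys else y :: PySem.List.insertBy before x ys := rfl

theorem pv_insertBy_prefix {α : Type} (before : α → α → Bool) (x : α) (P S : List α)
    (h : ∀ p ∈ P, before x p = false) :
    PySem.List.insertBy before x (P ++ S) = P ++ PySem.List.insertBy before x S := by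
  induction P with
  | nil => simp
  | cons p P ih =>
      simp only [List.cons_append, pv_insertBy_cons, h p (by simp)]
      simp only [Bool.false_eq_true, if_false, List.cons.injEq, true_and]
      exact ih (fun q hq => h q (by simp [hq]))

theorem pv_insertBy_head {α : Type} (before : α → α → Bool) (x : α) (S : List α)
    (h : ∀ s ∈ S, before x s = true) :
    PySem.List.insertBy before x S = x :: S := by
  cases S with
  | nil => rfl
  | cons s S => simp [pv_insertBy_cons, h s (by simp)]

theorem pv_flatMap_congr {α β : Type} (f g : α → List β) (l : List α)
    (h : ∀ v ∈ l, f v = g v) : l.flatMap f = l.flatMap g := by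
  induction l with
  | nil => rfl
  | cons v l ih => simp [List.flatMap_cons, h v (by simp), ih (fun w hw => h w (by simp [hw]))]

-- stable sort by an Int-valued key whose values all lie in a strictly increasing list `vals`
-- equals the concatenation of the key-buckets in `vals` order.
theorem pv_sorted_buckets {α : Type} (key : α → Int) (vals : List Int)
    (hv : vals.Pairwise (· < ·)) :
    ∀ l : List α, (∀ x ∈ l, key x ∈ vals) →
      PySem.List.sorted l key false = vals.flatMap (fun v => l.filter (fun x => key x = v)) := by
  intro l
  induction l using List.reverseRecOn with
  | nil => simp [PySem.List.sorted_eq_foldl_insertBy]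
  | append_singleton l' x ih =>
      intro hall
      have hx : key x ∈ vals := hall x (by simp)
      obtain ⟨s, t, hst⟩ := List.append_of_mem hx
      have hv' := hst ▸ hv
      rw [List.pairwise_append] at hv'
      obtain ⟨hs, ht, hcross⟩ := hv'
      rw [List.pairwise_cons] at ht
      have hsx : ∀ v ∈ s, v < key x := fun v hvs => hcross v hvs (key x) (by simp)
      have htx : ∀ v ∈ t, key x < v := ht.1
      have hsort : PySem.List.sorted (l' ++ [x]) key false =
          PySem.List.insertBy (fun a b => decide (key a < key b)) x
            (PySem.List.sorted l' key false) := by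
        rw [PySem.List.sorted_eq_foldl_insertBy, PySem.List.sorted_eq_foldl_insertBy,
          List.foldl_append]
        rfl
      rw [hsort, ih (fun y hy => hall y (by simp [hy]))]
      rw [hst]
      have hL : (s ++ key x :: t).flatMap (fun v => l'.filter (fun y => key y = v)) =
          (s.flatMap (fun v => l'.filter (fun y => key y = v)) ++
            l'.filter (fun y => key y = key x)) ++
            t.flatMap (fun v => l'.filter (fun y => key y = v)) := by
        simp [List.flatMap_append]
      have hpre : ∀ p ∈ s.flatMap (fun v => l'.filter (fun y => key y = v)) ++
          l'.filter (fun y => key y = key x),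
          (fun a b => decide (key a < key b)) x p = false := by
        intro p hp
        simp only [List.mem_append, List.mem_flatMap, List.mem_filter] at hp
        rcases hp with ⟨v, hvs, _, hpk⟩ | ⟨_, hpk⟩
        · have h1 : key p = v := by simpa using hpk
          have := hsx v hvs
          simp only [decide_eq_false_iff_not]
          omega
        · have h1 : key p = key x := by simpa using hpk
          simp [h1]
      have hhead : ∀ p ∈ t.flatMap (fun v => l'.filter (fun y => key y = v)),
          (fun a b => decide (key a < key b)) x p = true := by
        intro p hp
        simp only [List.mem_flatMap, List.mem_filter] at hp
        obtain ⟨v, hvt, _, hpk⟩ := hp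
        have h1 : key p = v := by simpa using hpk
        simp only [decide_eq_true_eq]
        rw [h1]; exact htx v hvt
      have hcs : ∀ v ∈ s, (l' ++ [x]).filter (fun y => key y = v) =
          l'.filter (fun y => key y = v) := by
        intro v hvs
        have hne : ¬ (key x = v) := by have := hsx v hvs; omega
        simp [List.filter_append, List.filter, hne]
      have hct : ∀ v ∈ t, (l' ++ [x]).filter (fun y => key y = v) =
          l'.filter (fun y => key y = v) := by
        intro v hvt
        have hne : ¬ (key x = v) := by have := htx v hvt; omega
        simp [List.filter_append, List.filter, hne]
      have hmid : (l' ++ [x]).filter (fun y => key y = key x) =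
          l'.filter (fun y => key y = key x) ++ [x] := by
        simp [List.filter_append, List.filter]
      rw [hL, pv_insertBy_prefix _ _ _ _ hpre, pv_insertBy_head _ _ _ hhead]
      simp only [List.flatMap_append, List.flatMap_cons]
      rw [pv_flatMap_congr _ _ s hcs, pv_flatMap_congr _ _ t hct, hmid]
      simp

-- the rank table, evaluated
theorem pvRank_eq : pvRank = PySem.Dict.mk
    [("pallavi", 0), ("anupallavi", 1), ("charanam", 2), ("samashti_charanam", 3),
     ("madhyamakala", 4), ("chittaswaram", 5), ("swara_sahitya", 6)] := by decide

-- ranks all lie in [0..7]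
theorem pv_rank_mem (k : String) :
    PySem.Dict.getD pvRank k 7 ∈ ([0, 1, 2, 3, 4, 5, 6, 7] : List Int) := by
  rw [pvRank_eq]
  simp only [PySem.Dict.getD_eq_get?_getD, PySem.Dict.get?_mk_cons, beq_iff_eq]
  split_ifs <;> simp [PySem.Dict.get?]

theorem pv_rank_0 (k : String) : PySem.Dict.getD pvRank k 7 = 0 ↔ k = "pallavi" := by
  rw [pvRank_eq]; simp only [PySem.Dict.getD_eq_get?_getD, PySem.Dict.get?_mk_cons, beq_iff_eq]
  split_ifs <;> (try subst_vars) <;> simp_all [PySem.Dict.get?, eq_comm]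
theorem pv_rank_1 (k : String) : PySem.Dict.getD pvRank k 7 = 1 ↔ k = "anupallavi" := by
  rw [pvRank_eq]; simp only [PySem.Dict.getD_eq_get?_getD, PySem.Dict.get?_mk_cons, beq_iff_eq]
  split_ifs <;> (try subst_vars) <;> simp_all [PySem.Dict.get?, eq_comm]
theorem pv_rank_2 (k : String) : PySem.Dict.getD pvRank k 7 = 2 ↔ k = "charanam" := by
  rw [pvRank_eq]; simp only [PySem.Dict.getD_eq_get?_getD, PySem.Dict.get?_mk_cons, beq_iff_eq]
  split_ifs <;> (try subst_vars) <;> simp_all [PySem.Dict.get?, eq_comm]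
theorem pv_rank_3 (k : String) : PySem.Dict.getD pvRank k 7 = 3 ↔ k = "samashti_charanam" := by
  rw [pvRank_eq]; simp only [PySem.Dict.getD_eq_get?_getD, PySem.Dict.get?_mk_cons, beq_iff_eq]
  split_ifs <;> (try subst_vars) <;> simp_all [PySem.Dict.get?, eq_comm]
theorem pv_rank_4 (k : String) : PySem.Dict.getD pvRank k 7 = 4 ↔ k = "madhyamakala" := by
  rw [pvRank_eq]; simp only [PySem.Dict.getD_eq_get?_getD, PySem.Dict.get?_mk_cons, beq_iff_eq]
  split_ifs <;> (try subst_vars) <;> simp_all [PySem.Dict.get?, eq_comm]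
theorem pv_rank_5 (k : String) : PySem.Dict.getD pvRank k 7 = 5 ↔ k = "chittaswaram" := by
  rw [pvRank_eq]; simp only [PySem.Dict.getD_eq_get?_getD, PySem.Dict.get?_mk_cons, beq_iff_eq]
  split_ifs <;> (try subst_vars) <;> simp_all [PySem.Dict.get?, eq_comm]
theorem pv_rank_6 (k : String) : PySem.Dict.getD pvRank k 7 = 6 ↔ k = "swara_sahitya" := by
  rw [pvRank_eq]; simp only [PySem.Dict.getD_eq_get?_getD, PySem.Dict.get?_mk_cons, beq_iff_eq]
  split_ifs <;> (try subst_vars) <;> simp_all [PySem.Dict.get?, eq_comm]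
theorem pv_rank_7 (k : String) : PySem.Dict.getD pvRank k 7 = 7 ↔ k ∉ pvCanonicalOrder := by
  rw [pvRank_eq]; simp only [PySem.Dict.getD_eq_get?_getD, PySem.Dict.get?_mk_cons, beq_iff_eq, pvCanonicalOrder]
  split_ifs <;> (try subst_vars) <;> simp_all [PySem.Dict.get?, eq_comm]

theorem pv_contains_add (s : PySem.Set String) (x y : String) :
    PySem.Set.contains (PySem.Set.add s x) y = (PySem.Set.contains s y || y == x) := by
  rw [Bool.eq_iff_iff]
  simp [PySem.Set.contains, PySem.Set.mem_add]

-- A's first loop, result component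
theorem pv_loop1_fst (d : PySem.Dict String (String × String)) (cks : List String) :
    ∀ (r0 : List (String × String)) (s0 : PySem.Set String),
      (cks.foldl
        (fun (acc : List (String × String) × PySem.Set String) ck =>
          match d.get? ck with
          | some p => (acc.1 ++ [p], PySem.Set.add acc.2 ck)
          | none => acc) (r0, s0)).1 =
      r0 ++ cks.flatMap (fun ck => (d.get? ck).toList) := by
  induction cks with
  | nil => intro r0 s0; simp
  | cons ck cks ih =>
      intro r0 s0
      cases h : d.get? ck <;> simp [List.foldl_cons, h, ih]

-- A's first loop, seen component (as a membership test)
theorem pv_loop1_snd (d : PySem.Dict String (String × String)) (cks : List String) :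
    ∀ (r0 : List (String × String)) (s0 : PySem.Set String) (k : String),
      PySem.Set.contains (cks.foldl
        (fun (acc : List (String × String) × PySem.Set String) ck =>
          match d.get? ck with
          | some p => (acc.1 ++ [p], PySem.Set.add acc.2 ck)
          | none => acc) (r0, s0)).2 k =
      (PySem.Set.contains s0 k || (decide (k ∈ cks) && (d.get? k).isSome)) := by
  induction cks with
  | nil => intro r0 s0 k; simp
  | cons ck cks ih =>
      intro r0 s0 k
      cases h : d.get? ck with
      | none =>
          simp only [List.foldl_cons, h]
          rw [ih]
          by_cases hk : k = ck
          · subst hk; simp [h]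
          · simp [hk]
      | some p =>
          simp only [List.foldl_cons, h]
          rw [ih, pv_contains_add]
          by_cases hk : k = ck
          · subst hk; simp [h]
          · simp [hk, beq_eq_false_iff_ne.mpr hk]

-- A's second loop appends the non-seen values
theorem pv_loop2 (seen : PySem.Set String) (l : List (String × (String × String))) :
    ∀ r0 : List (String × String),
      l.foldl (fun r kv => if PySem.Set.contains seen kv.1 then r else r ++ [kv.2]) r0 =
      r0 ++ (l.filter (fun kv => !(PySem.Set.contains seen kv.1))).map (fun kv => kv.2) := by
  induction l with
  | nil => intro r0; simp
  | cons kv l ih =>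
      intro r0
      simp only [List.foldl_cons]
      by_cases h : PySem.Set.contains seen kv.1
      · have h' : kv.1 ∈ seen := by simpa [PySem.Set.contains] using h
        rw [if_pos h, ih]; simp [h']
      · have h' : ¬ kv.1 ∈ seen := by simpa [PySem.Set.contains] using h
        rw [if_neg h, ih]; simp [h']

-- with unique keys, the bucket of key c maps to the dict lookup at c
theorem pv_filter_key (c : String) :
    ∀ l : List (String × (String × String)), (l.map Prod.fst).Nodup →
      (l.filter (fun kv => kv.1 = c)).map (fun kv => kv.2) =
      ((l.find? (fun p => p.1 == c)).map (fun p => p.2)).toList := by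
  intro l
  induction l with
  | nil => simp
  | cons kv l ih =>
      intro hnd
      simp only [List.map_cons, List.nodup_cons] at hnd
      by_cases h : kv.1 = c
      · have hnil : l.filter (fun kv => kv.1 = c) = [] := by
          rw [List.filter_eq_nil_iff]
          intro q hq hqc
          exact hnd.1 (h ▸ (by simpa using hqc) ▸ (List.mem_map_of_mem hq))
        simp [List.find?, h, hnil]
      · have hb : (kv.1 == c) = false := by simpa using h
        simp [List.find?, h, hb, ih hnd.2]

theorem ordered_sections_eq (sections : List (String × String)) :
    ordered_sections sections = ordered_sections_alt sections := by
  have hnd : (pvNormalised sections).keys.Nodup :=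
    PySem.Dict.nodup_keys_foldl_insert_key sections (fun kv => pvNormKey kv.1)
      (fun d kv => (kv.1, kv.2)) PySem.Dict.empty PySem.Dict.nodup_keys_empty
  have hnd' : ((pvNormalised sections).items.map Prod.fst).Nodup := by
    simpa [PySem.Dict.keys] using hnd
  set d := pvNormalised sections with hd
  have hlen : (pvCanonicalOrder.length : Int) = 7 := by decide
  -- B's side: the stable sort splits into rank buckets
  have hB : ordered_sections_alt sections =
      (([0, 1, 2, 3, 4, 5, 6, 7] : List Int).flatMap
        (fun v => d.items.filter (fun kv => PySem.Dict.getD pvRank kv.1 7 = v))).map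
        (fun kv => kv.2) := by
    unfold ordered_sections_alt
    rw [← hd]
    simp only [hlen]
    rw [pv_sorted_buckets _ _ (by decide) _ (fun x _ => pv_rank_mem x.1)]
  -- A's side: the two loops
  have hA : ordered_sections sections =
      pvCanonicalOrder.flatMap (fun ck => (d.get? ck).toList) ++
      (d.items.filter (fun kv =>
        !(decide (kv.1 ∈ pvCanonicalOrder) && (d.get? kv.1).isSome))).map (fun kv => kv.2) := by
    unfold ordered_sections
    rw [← hd]
    rw [pv_loop2, pv_loop1_fst]
    simp only [pv_loop1_snd]
    simp [PySem.Set.empty, PySem.Set.contains]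
  -- identify each canonical bucket with the dict lookup
  have seg : ∀ (i : Int) (c : String),
      (∀ k : String, PySem.Dict.getD pvRank k 7 = i ↔ k = c) →
      (d.items.filter (fun kv => PySem.Dict.getD pvRank kv.1 7 = i)).map (fun kv => kv.2) =
      (d.get? c).toList := by
    intro i c hic
    have hf : (fun kv : String × (String × String) =>
        decide (PySem.Dict.getD pvRank kv.1 7 = i)) = (fun kv => decide (kv.1 = c)) := by
      funext kv; simp [hic kv.1]
    rw [hf, pv_filter_key c d.items hnd']
    rfl
  -- identify the leftover filters
  have hleft : d.items.filter (fun kv =>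
        !(decide (kv.1 ∈ pvCanonicalOrder) && (d.get? kv.1).isSome)) =
      d.items.filter (fun kv => PySem.Dict.getD pvRank kv.1 7 = 7) := by
    apply List.filter_congr
    intro kv hkv
    have hsome : d.get? kv.1 = some kv.2 :=
      PySem.Dict.get?_of_mem_items d (by simpa using hkv) hnd
    simp [hsome, pv_rank_7]
  rw [hA, hB, hleft]
  -- unfold both literal flatMaps into segments
  simp only [pvCanonicalOrder, List.flatMap_cons, List.flatMap_nil, List.append_nil,
    List.map_append]
  rw [seg 0 _ pv_rank_0, seg 1 _ pv_rank_1, seg 2 _ pv_rank_2, seg 3 _ pv_rank_3,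
    seg 4 _ pv_rank_4, seg 5 _ pv_rank_5, seg 6 _ pv_rank_6]
  simp [List.append_assoc]

-- ===== VERDICT (by name: the statement is the Claim_ definition above) =====
theorem ordered_sections_spec : Claim_equal_ordered_sections := by
  intro sections _
  unfold Spec_ordered_sections
  exact ordered_sections_eq sections
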